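-- pv_equiv track=rewrite | github.com/HOTHOTCOOLCOOL/TitanBot | nanobot/agent/tools/rpa_executor.py | _find_by_name
-- ===== SOURCE A (Python) =====
-- def _find_by_name(mapping: dict, target_name: str) -> tuple:
--     """
--     Find a UI element in anchors mapping by name.
--
--     Matching priority:
--     1. Exact match
--     2. Case-insensitive match
--     3. Substring/contains match (case-insensitive)
--
--     Returns: (index, element_dict) or (None, None) if not found.
--     """
--     target_lower = target_name.lower().strip()
--
--     # Don't match empty queries
--     if not target_lower:
--         return None, None
--
--     # Pass 1: Exact match
--     for idx, el in mapping.items():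
--         if el.get("name", "") == target_name:
--             return idx, el
--
--     # Pass 2: Case-insensitive exact match
--     for idx, el in mapping.items():
--         if el.get("name", "").lower() == target_lower:
--             return idx, el
--
--     # Pass 3: Substring/contains match (target is part of name)
--     for idx, el in mapping.items():
--         el_name_lower = el.get("name", "").lower()
--         if not el_name_lower:  # Skip unnamed elements
--             continue
--         if target_lower in el_name_lower:
--             return idx, el
--
--     return None, None
-- ===== SOURCE B (Python) =====
-- def _find_by_name(mapping: dict, target_name: str) -> tuple:
--     target_lower = target_name.lower().strip()
--     if not target_lower:
--         return None, None
--     ci = None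
--     sub = None
--     for idx, el in mapping.items():
--         name = el.get("name", "")
--         if name == target_name:
--             return idx, el  # exact match wins immediately
--         name_lower = name.lower()
--         if ci is None and name_lower == target_lower:
--             ci = (idx, el)
--         if sub is None and name_lower and target_lower in name_lower:
--             sub = (idx, el)
--     if ci is not None:
--         return ci
--     if sub is not None:
--         return sub
--     return None, None
-- ===== Notes on version B (the rewrite author's own statement) =====
-- stated objective: alternative
-- what changed: Replaced A's three sequential full passes (exact, case-insensitive, substring) by a single pass that returns at once on an exact match and records the first case-insensitive and first substring candidates for use after the loop.
import Mathlib
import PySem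

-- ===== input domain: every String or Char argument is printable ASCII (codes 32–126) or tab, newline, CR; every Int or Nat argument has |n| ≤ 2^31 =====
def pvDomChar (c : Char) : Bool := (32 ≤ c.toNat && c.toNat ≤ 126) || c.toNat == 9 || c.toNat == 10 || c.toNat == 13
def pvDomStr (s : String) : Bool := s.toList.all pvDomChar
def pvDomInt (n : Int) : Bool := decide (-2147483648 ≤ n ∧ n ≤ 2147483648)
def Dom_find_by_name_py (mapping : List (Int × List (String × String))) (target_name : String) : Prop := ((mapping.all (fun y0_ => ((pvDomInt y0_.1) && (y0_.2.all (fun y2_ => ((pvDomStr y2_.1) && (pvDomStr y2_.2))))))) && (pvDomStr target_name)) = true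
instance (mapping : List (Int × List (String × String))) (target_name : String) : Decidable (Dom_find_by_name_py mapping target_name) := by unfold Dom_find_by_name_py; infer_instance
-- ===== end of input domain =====

-- B replaces A's three sequential priority passes by one pass recording first-candidates
-- per tier (objective: alternative; same asymptotic cost, one traversal instead of three).

-- ===== PORT A =====
-- el.get("name", "")
def pvGetName (el : List (String × String)) : String := (PySem.Dict.mk el).getD "name" ""

-- Pass 1: exact match
def pvPass1 (mapping : List (Int × List (String × String))) (tn : String) :
    Option (Int × List (String × String)) :=
  match mapping with
  | [] => none
  | (i, el) :: rest => if pvGetName el = tn then some (i, el) else pvPass1 rest tn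

-- Pass 2: case-insensitive exact match
def pvPass2 (mapping : List (Int × List (String × String))) (tl : String) :
    Option (Int × List (String × String)) :=
  match mapping with
  | [] => none
  | (i, el) :: rest => if PySem.Str.lower (pvGetName el) = tl then some (i, el) else pvPass2 rest tl

-- Pass 3: substring match (skip unnamed elements)
def pvPass3 (mapping : List (Int × List (String × String))) (tl : String) :
    Option (Int × List (String × String)) :=
  match mapping with
  | [] => none
  | (i, el) :: rest =>
    let nl := PySem.Str.lower (pvGetName el)
    if nl = "" then pvPass3 rest tl
    else if PySem.Str.isIn tl nl then some (i, el) else pvPass3 rest tl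

def find_by_name_py (mapping : List (Int × List (String × String))) (target_name : String) :
    Option Int × (Option (List (String × String))) :=
  let target_lower := PySem.Str.strip (PySem.Str.lower target_name)
  if target_lower = "" then (none, none)
  else
    match pvPass1 mapping target_name with
    | some (i, el) => (some i, some el)
    | none =>
      match pvPass2 mapping target_lower with
      | some (i, el) => (some i, some el)
      | none =>
        match pvPass3 mapping target_lower with
        | some (i, el) => (some i, some el)
        | none => (none, none)

-- ===== PORT B =====
-- el.get("name", "") (B's own helper)
def pvGetNameB (el : List (String × String)) : String := (PySem.Dict.mk el).getD "name" ""

-- single pass: return on exact match, record first CI and first substring candidates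
def pvLoopB (mapping : List (Int × List (String × String))) (tn tl : String)
    (ci sub : Option (Int × List (String × String))) :
    Option Int × (Option (List (String × String))) :=
  match mapping with
  | [] =>
    match ci with
    | some (i, el) => (some i, some el)
    | none =>
      match sub with
      | some (i, el) => (some i, some el)
      | none => (none, none)
  | (i, el) :: rest =>
    let name := pvGetNameB el
    if name = tn then (some i, some el)
    else
      let nl := PySem.Str.lower name
      let ci' := if ci = none ∧ nl = tl then some (i, el) else ci
      let sub' := if sub = none ∧ nl ≠ "" ∧ PySem.Str.isIn tl nl then some (i, el) else sub
      pvLoopB rest tn tl ci' sub'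

def find_by_name_py_alt (mapping : List (Int × List (String × String))) (target_name : String) :
    Option Int × (Option (List (String × String))) :=
  let target_lower := PySem.Str.strip (PySem.Str.lower target_name)
  if target_lower = "" then (none, none)
  else pvLoopB mapping target_name target_lower none none

-- ===== PRECONDITION & SPEC =====
def Spec_find_by_name_py (mapping : List (Int × List (String × String))) (target_name : String) (out : Option Int × (Option (List (String × String)))) : Prop := out = find_by_name_py_alt mapping target_name
instance (mapping : List (Int × List (String × String))) (target_name : String) (out : Option Int × (Option (List (String × String)))) : Decidable (Spec_find_by_name_py mapping target_name out) := by unfold Spec_find_by_name_py; infer_instance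

-- ===== CLAIM (what is proved, stated in full; the proofs are below) =====
def Claim_equal_find_by_name_py : Prop := ∀ (mapping : List (Int × List (String × String))) (target_name : String), Dom_find_by_name_py mapping target_name → Spec_find_by_name_py mapping target_name (find_by_name_py mapping target_name)

-- ===== LEMMAS AND PROOFS =====

-- B's one-pass loop with candidates ci/sub equals A's three passes, the earlier
-- candidates taking priority over anything pass 2 / pass 3 find in the remainder.
lemma pvLoopB_eq (mapping : List (Int × List (String × String))) (tn tl : String)
    (ci sub : Option (Int × List (String × String))) (htl : tl ≠ "") :
    pvLoopB mapping tn tl ci sub =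
      match pvPass1 mapping tn with
      | some (i, el) => (some i, some el)
      | none =>
        match ci.or (pvPass2 mapping tl) with
        | some (i, el) => (some i, some el)
        | none =>
          match sub.or (pvPass3 mapping tl) with
          | some (i, el) => (some i, some el)
          | none => (none, none) := by
  induction mapping generalizing ci sub with
  | nil =>
    cases ci <;> cases sub <;> simp [pvLoopB, pvPass1, pvPass2, pvPass3]
  | cons hd rest ih =>
    obtain ⟨i, el⟩ := hd
    simp only [pvLoopB, pvPass1, pvGetNameB, pvGetName]
    by_cases hx : (PySem.Dict.mk el).getD "name" "" = tn
    · simp [hx]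
    · rw [if_neg hx, if_neg hx, ih]
      cases hp : pvPass1 rest tn with
      | some p => rfl
      | none =>
        cases ci <;> cases sub <;>
          by_cases h2 : PySem.Str.lower ((PySem.Dict.mk el).getD "name" "") = tl <;>
          by_cases h3 : PySem.Str.lower ((PySem.Dict.mk el).getD "name" "") = "" <;>
          by_cases h4 : PySem.Chars.isIn tl.toList (PySem.Chars.lower (((PySem.Dict.mk el).getD "name" "").toList)) = true <;>
          simp [pvPass2, pvPass3, pvGetName, h2, h3, h4, htl]

-- ===== VERDICT (by name: the statement is the Claim_ definition above) =====
theorem find_by_name_py_spec : Claim_equal_find_by_name_py := by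
  intro mapping target_name _
  unfold Spec_find_by_name_py
  by_cases h : PySem.Str.strip (PySem.Str.lower target_name) = ""
  · simp [find_by_name_py, find_by_name_py_alt, h]
  · have e := pvLoopB_eq mapping target_name
      (PySem.Str.strip (PySem.Str.lower target_name)) none none h
    simp only [find_by_name_py, find_by_name_py_alt, if_neg h, e, Option.none_or]
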